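-- pv_equiv track=rewrite | github.com/helmsTC/optimizations | mask/MaskPLS/mask_pls/models/dgcnn/dgcnn_backbone_efficient.py | _layer_types_match
-- ===== SOURCE A (Python) =====
-- def _layer_types_match(key1, key2):
--     """Check if two layer keys are of compatible types"""
--     # Extract layer type indicators
--     type_indicators = {
--         'conv': ['conv', 'Conv'],
--         'bn': ['bn', 'batch_norm', 'BatchNorm'],
--         'linear': ['linear', 'fc', 'classifier'],
--     }
--
--     for layer_type, indicators in type_indicators.items():
--         key1_is_type = any(ind in key1 for ind in indicators)
--         key2_is_type = any(ind in key2 for ind in indicators)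
--         if key1_is_type and key2_is_type:
--             return True
--
--     return False
-- ===== SOURCE B (Python) =====
-- # Sliding-window multi-pattern matcher: patterns indexed by length in a hash
-- # table; one scan over each key builds a type bitmask, then test bitmask overlap.
-- _BIT = {'conv': 1, 'bn': 2, 'linear': 4}
--
-- _BY_LEN = {
--     2: {'bn': 2, 'fc': 4},
--     4: {'conv': 1, 'Conv': 1},
--     6: {'linear': 4},
--     9: {'BatchNorm': 2},
--     10: {'batch_norm': 2, 'classifier': 4},
-- }
--
--
-- def _mask(key):
--     m = 0
--     for i in range(len(key)):
--         for L, table in _BY_LEN.items():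
--             m |= table.get(key[i:i + L], 0)
--     return m
--
--
-- def _layer_types_match(key1, key2):
--     """Check if two layer keys are of compatible types"""
--     return (_mask(key1) & _mask(key2)) != 0
-- ===== Notes on version B (the rewrite author's own statement) =====
-- stated objective: alternative
-- what changed: B replaces A's per-pattern substring-containment tests with a sliding-window multi-pattern matcher: the indicators are indexed by length in a hash table, one scan over each key collects a type bitmask via window lookups, and the result is whether the two bitmasks overlap.
import Mathlib
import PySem

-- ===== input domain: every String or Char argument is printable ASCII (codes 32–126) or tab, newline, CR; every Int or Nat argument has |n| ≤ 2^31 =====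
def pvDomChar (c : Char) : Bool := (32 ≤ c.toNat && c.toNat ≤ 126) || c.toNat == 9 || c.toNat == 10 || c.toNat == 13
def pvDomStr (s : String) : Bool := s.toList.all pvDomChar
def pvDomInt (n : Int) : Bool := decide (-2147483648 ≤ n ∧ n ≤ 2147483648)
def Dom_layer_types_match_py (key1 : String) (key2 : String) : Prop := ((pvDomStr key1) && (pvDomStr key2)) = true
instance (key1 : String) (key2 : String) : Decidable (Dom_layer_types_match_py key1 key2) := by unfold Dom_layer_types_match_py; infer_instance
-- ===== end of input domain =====

-- B replaces A's per-pattern substring tests with a length-indexed sliding-window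
-- matcher building a bitmask per key (alternative algorithm, same result).

-- ===== PORT A =====
def pvIndicators : List (String × List String) :=
  [("conv", ["conv", "Conv"]),
   ("bn", ["bn", "batch_norm", "BatchNorm"]),
   ("linear", ["linear", "fc", "classifier"])]

-- literal port of A's for-loop over type_indicators with early return
def pvGoA (key1 key2 : String) : List (String × List String) → Bool
  | [] => false
  | (_, inds) :: rest =>
    let key1_is_type := inds.any (fun ind => PySem.Str.isIn ind key1)
    let key2_is_type := inds.any (fun ind => PySem.Str.isIn ind key2)
    if key1_is_type && key2_is_type then true else pvGoA key1 key2 rest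

def layer_types_match_py (key1 : String) (key2 : String) : Bool :=
  pvGoA key1 key2 pvIndicators

-- ===== PORT B =====
-- _BY_LEN: indicators indexed by their length; values are (indicator ↦ type bit) dicts
def pvByLen : List (Nat × PySem.Dict (List Char) Nat) :=
  [(2, PySem.Dict.mk [(['b','n'], 2), (['f','c'], 4)]),
   (4, PySem.Dict.mk [(['c','o','n','v'], 1), (['C','o','n','v'], 1)]),
   (6, PySem.Dict.mk [(['l','i','n','e','a','r'], 4)]),
   (9, PySem.Dict.mk [(['B','a','t','c','h','N','o','r','m'], 2)]),
   (10, PySem.Dict.mk [(['b','a','t','c','h','_','n','o','r','m'], 2),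
                       (['c','l','a','s','s','i','f','i','e','r'], 4)])]

-- _mask(key): key[i:i+L] for 0 ≤ i < len(key) is exactly take L (drop i) (hand port, exact here)
def pvMask (key : String) : Nat :=
  (List.range key.toList.length).foldl
    (fun m i =>
      pvByLen.foldl (fun m' p => m' ||| PySem.Dict.getD p.2 ((key.toList.drop i).take p.1) 0) m)
    0

def layer_types_match_py_alt (key1 : String) (key2 : String) : Bool :=
  (pvMask key1 &&& pvMask key2) != 0

-- ===== PRECONDITION & SPEC =====
def Spec_layer_types_match_py (key1 : String) (key2 : String) (out : Bool) : Prop := out = layer_types_match_py_alt key1 key2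
instance (key1 : String) (key2 : String) (out : Bool) : Decidable (Spec_layer_types_match_py key1 key2 out) := by unfold Spec_layer_types_match_py; infer_instance

-- ===== CLAIM (what is proved, stated in full; the proofs are below) =====
def Claim_equal_layer_types_match_py : Prop := ∀ (key1 : String) (key2 : String), Dom_layer_types_match_py key1 key2 → Spec_layer_types_match_py key1 key2 (layer_types_match_py key1 key2)

-- ===== LEMMAS AND PROOFS =====

-- OR-accumulating fold: peel the initial accumulator off
theorem pv_foldl_or (f : Nat → Nat) (l : List Nat) (m : Nat) :
    l.foldl (fun m i => m ||| f i) m = m ||| l.foldl (fun m i => m ||| f i) 0 := by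
  induction l generalizing m with
  | nil => simp
  | cons a t ih =>
    simp only [List.foldl_cons]
    rw [ih (m ||| f a), ih (0 ||| f a)]
    simp [Nat.or_assoc]

-- OR-fold of a pointwise OR splits
theorem pv_foldl_or_split (f g : Nat → Nat) (l : List Nat) :
    l.foldl (fun m i => m ||| (f i ||| g i)) 0 =
      l.foldl (fun m i => m ||| f i) 0 ||| l.foldl (fun m i => m ||| g i) 0 := by
  induction l with
  | nil => simp
  | cons a t ih =>
    simp only [List.foldl_cons]
    rw [pv_foldl_or (fun i => f i ||| g i), pv_foldl_or f, pv_foldl_or g, ih]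
    simp only [Nat.zero_or]
    rw [Nat.or_assoc, Nat.or_assoc, ← Nat.or_assoc (g a),
        Nat.or_comm (g a) (t.foldl (fun m i => m ||| f i) 0), Nat.or_assoc]

-- OR-fold of a guarded constant is a guarded constant
theorem pv_foldl_or_if (p : Nat → Bool) (b : Nat) (l : List Nat) :
    l.foldl (fun m i => m ||| (if p i then b else 0)) 0 = if l.any p then b else 0 := by
  induction l with
  | nil => simp
  | cons a t ih =>
    simp only [List.foldl_cons, List.any_cons]
    rw [pv_foldl_or (fun i => if p i then b else 0), ih]
    rcases Bool.eq_false_or_eq_true (p a) with h | h <;>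
      rcases Bool.eq_false_or_eq_true (t.any p) with h2 | h2 <;> simp [h, h2]

-- literal dict lookups as ORs of guarded constants
theorem pv_getD1 (k1 s : List Char) (x : Nat) :
    PySem.Dict.getD (PySem.Dict.mk [(k1, x)]) s 0 = (if k1 == s then x else 0) := by
  cases h : k1 == s <;> simp [PySem.Dict.getD, PySem.Dict.get?, List.find?, h]

theorem pv_getD2 (k1 k2 : List Char) (x y : Nat) (hne : (k1 == k2) = false) (s : List Char) :
    PySem.Dict.getD (PySem.Dict.mk [(k1, x), (k2, y)]) s 0 =
      ((if k1 == s then x else 0) ||| (if k2 == s then y else 0)) := by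
  simp only [PySem.Dict.getD, PySem.Dict.get?, List.find?]
  cases h1 : k1 == s <;> cases h2 : k2 == s <;> simp_all

-- a window hit at any length means the indicator occurs in the key
theorem pv_hit_isIn (k ind : List Char) (L i : Nat)
    (h : (k.drop i).take L = ind) : PySem.Chars.isIn ind k = true := by
  rw [PySem.Chars.isIn_iff_infix]
  exact List.IsInfix.trans (h ▸ List.take_prefix L (k.drop i)).isInfix (List.drop_suffix i k).isInfix

-- conversely an occurrence yields a window hit at the indicator's own length
theorem pv_isIn_hit (k ind : List Char) (hne : ind ≠ [])
    (h : PySem.Chars.isIn ind k = true) :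
    (List.range k.length).any (fun i => ind == (k.drop i).take ind.length) = true := by
  obtain ⟨j, hj⟩ := (PySem.Chars.exists_prefix_drop_iff_isIn ind k).2 h
  have hjlt : j < k.length := by
    by_contra hge
    rw [List.drop_eq_nil_of_le (le_of_not_gt hge)] at hj
    exact hne (List.prefix_nil.mp hj)
  refine List.any_eq_true.2 ⟨j, List.mem_range.2 hjlt, ?_⟩
  simpa using List.prefix_iff_eq_take.mp hj

-- the window scan at an indicator's own length equals isIn
theorem pv_window_eq (k ind : List Char) (L : Nat) (hne : ind ≠ []) (hL : ind.length = L) :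
    (List.range k.length).any (fun i => ind == (k.drop i).take L) =
      PySem.Chars.isIn ind k := by
  subst hL
  cases hIn : PySem.Chars.isIn ind k with
  | true => exact pv_isIn_hit k ind hne hIn
  | false =>
    rw [← Bool.not_eq_true]
    intro hany
    obtain ⟨i, _, hi⟩ := List.any_eq_true.1 hany
    rw [pv_hit_isIn k ind ind.length i (eq_of_beq hi).symm] at hIn
    exact Bool.true_eq_false.mp hIn

-- the mask is the OR of the per-indicator bits guarded by isIn
set_option maxHeartbeats 1000000 in
theorem pv_mask_eq (key : String) :
    pvMask key =
      ((if PySem.Chars.isIn ['b','n'] key.toList then 2 else 0) |||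
       ((if PySem.Chars.isIn ['f','c'] key.toList then 4 else 0) |||
        ((if PySem.Chars.isIn ['c','o','n','v'] key.toList then 1 else 0) |||
         ((if PySem.Chars.isIn ['C','o','n','v'] key.toList then 1 else 0) |||
          ((if PySem.Chars.isIn ['l','i','n','e','a','r'] key.toList then 4 else 0) |||
           ((if PySem.Chars.isIn ['B','a','t','c','h','N','o','r','m'] key.toList then 2 else 0) |||
            ((if PySem.Chars.isIn ['b','a','t','c','h','_','n','o','r','m'] key.toList then 2 else 0) |||
             (if PySem.Chars.isIn ['c','l','a','s','s','i','f','i','e','r'] key.toList then 4 else 0)))))))) := by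
  have h2 := pv_getD2 ['b','n'] ['f','c'] 2 4 (by decide)
  have h4 := pv_getD2 ['c','o','n','v'] ['C','o','n','v'] 1 1 (by decide)
  have h10 := pv_getD2 ['b','a','t','c','h','_','n','o','r','m']
    ['c','l','a','s','s','i','f','i','e','r'] 2 4 (by decide)
  unfold pvMask pvByLen
  simp only [List.foldl_cons, List.foldl_nil, h2, h4, h10, pv_getD1, Nat.or_assoc]
  simp only [pv_foldl_or_split, pv_foldl_or_if]
  rw [pv_window_eq (k := key.toList) (ind := ['b','n']) (L := 2) (hne := by decide) (hL := rfl),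
      pv_window_eq (k := key.toList) (ind := ['f','c']) (L := 2) (hne := by decide) (hL := rfl),
      pv_window_eq (k := key.toList) (ind := ['c','o','n','v']) (L := 4) (hne := by decide) (hL := rfl),
      pv_window_eq (k := key.toList) (ind := ['C','o','n','v']) (L := 4) (hne := by decide) (hL := rfl),
      pv_window_eq (k := key.toList) (ind := ['l','i','n','e','a','r']) (L := 6) (hne := by decide) (hL := rfl),
      pv_window_eq (k := key.toList) (ind := ['B','a','t','c','h','N','o','r','m']) (L := 9) (hne := by decide) (hL := rfl),
      pv_window_eq (k := key.toList) (ind := ['b','a','t','c','h','_','n','o','r','m']) (L := 10) (hne := by decide) (hL := rfl),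
      pv_window_eq (k := key.toList) (ind := ['c','l','a','s','s','i','f','i','e','r']) (L := 10) (hne := by decide) (hL := rfl)]

set_option maxHeartbeats 4000000 in
theorem pv_eq (key1 key2 : String) :
    layer_types_match_py key1 key2 = layer_types_match_py_alt key1 key2 := by
  unfold layer_types_match_py layer_types_match_py_alt pvIndicators
  rw [pv_mask_eq key1, pv_mask_eq key2]
  simp only [pvGoA, List.any_cons, List.any_nil, PySem.Str.isIn_eq,
    show "conv".toList = ['c','o','n','v'] from rfl,
    show "Conv".toList = ['C','o','n','v'] from rfl,
    show "bn".toList = ['b','n'] from rfl,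
    show "batch_norm".toList = ['b','a','t','c','h','_','n','o','r','m'] from rfl,
    show "BatchNorm".toList = ['B','a','t','c','h','N','o','r','m'] from rfl,
    show "linear".toList = ['l','i','n','e','a','r'] from rfl,
    show "fc".toList = ['f','c'] from rfl,
    show "classifier".toList = ['c','l','a','s','s','i','f','i','e','r'] from rfl]
  generalize PySem.Chars.isIn ['c','o','n','v'] key1.toList = c1
  generalize PySem.Chars.isIn ['C','o','n','v'] key1.toList = C1
  generalize PySem.Chars.isIn ['b','n'] key1.toList = b1
  generalize PySem.Chars.isIn ['b','a','t','c','h','_','n','o','r','m'] key1.toList = n1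
  generalize PySem.Chars.isIn ['B','a','t','c','h','N','o','r','m'] key1.toList = N1
  generalize PySem.Chars.isIn ['l','i','n','e','a','r'] key1.toList = l1
  generalize PySem.Chars.isIn ['f','c'] key1.toList = f1
  generalize PySem.Chars.isIn ['c','l','a','s','s','i','f','i','e','r'] key1.toList = s1
  generalize PySem.Chars.isIn ['c','o','n','v'] key2.toList = c2
  generalize PySem.Chars.isIn ['C','o','n','v'] key2.toList = C2
  generalize PySem.Chars.isIn ['b','n'] key2.toList = b2
  generalize PySem.Chars.isIn ['b','a','t','c','h','_','n','o','r','m'] key2.toList = n2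
  generalize PySem.Chars.isIn ['B','a','t','c','h','N','o','r','m'] key2.toList = N2
  generalize PySem.Chars.isIn ['l','i','n','e','a','r'] key2.toList = l2
  generalize PySem.Chars.isIn ['f','c'] key2.toList = f2
  generalize PySem.Chars.isIn ['c','l','a','s','s','i','f','i','e','r'] key2.toList = s2
  revert c1 C1 b1 n1 N1 l1 f1 s1 c2 C2 b2 n2 N2 l2 f2 s2
  decide

-- ===== VERDICT (by name: the statement is the Claim_ definition above) =====
theorem layer_types_match_py_spec : Claim_equal_layer_types_match_py := by
  intro key1 key2 _
  unfold Spec_layer_types_match_py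
  exact pv_eq key1 key2
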